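-- pv_equiv track=rewrite | github.com/jung-jinyoung/algostudy2025 | 6주차(250422)/이현복/무인도 여행.py | solution
-- ===== SOURCE A (Python) =====
-- from collections import deque
--
-- def solution(maps):
--     answer = []
--     n,m = len(maps),len(maps[0])
--     v = [[0]*m for _ in range(n)]
--     for i in range(n):
--         for j in range(m):
--             if v[i][j] == 0:
--                 v[i][j]^=1
--                 if maps[i][j] != 'X':
--                     q = deque()
--                     q.append((i,j))
--                     cnt = int(maps[i][j])
--                     while q:
--                         I,J = q.popleft()
--                         for ni,nj in ((I,J-1),(I,J+1),(I+1,J),(I-1,J)):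
--                             if 0<=ni<n and 0<=nj<m and v[ni][nj]==0 and maps[ni][nj] != 'X':
--                                 v[ni][nj]^=1
--                                 cnt += int(maps[ni][nj])
--                                 q.append((ni,nj))
--                     answer.append(cnt)
--     answer.sort()
--     return answer if answer else [-1]
-- ===== SOURCE B (Python) =====
-- def solution(maps):
--     n, m = len(maps), len(maps[0])
--     remaining = {(i, j) for i in range(n) for j in range(m) if maps[i][j] != 'X'}
--     sums = []
--     for i in range(n):
--         for j in range(m):
--             if (i, j) in remaining:
--                 comp = {(i, j)}
--                 frontier = {(i, j)}
--                 while frontier: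
--                     frontier = ({(x + dx, y + dy)
--                                  for (x, y) in frontier
--                                  for dx, dy in ((0, -1), (0, 1), (1, 0), (-1, 0))}
--                                 & remaining) - comp
--                     comp |= frontier
--                 remaining -= comp
--                 sums.append(sum(int(maps[x][y]) for (x, y) in comp))
--     return sorted(sums) if sums else [-1]
-- ===== Notes on version B (the rewrite author's own statement) =====
-- stated objective: alternative
-- what changed: Replaces the per-cell deque BFS with a visited matrix by whole-frontier set saturation: each component is grown by repeatedly intersecting the neighbour set of the current frontier with the remaining land cells, and its sum is taken in one pass at the end.
import Mathlib
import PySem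

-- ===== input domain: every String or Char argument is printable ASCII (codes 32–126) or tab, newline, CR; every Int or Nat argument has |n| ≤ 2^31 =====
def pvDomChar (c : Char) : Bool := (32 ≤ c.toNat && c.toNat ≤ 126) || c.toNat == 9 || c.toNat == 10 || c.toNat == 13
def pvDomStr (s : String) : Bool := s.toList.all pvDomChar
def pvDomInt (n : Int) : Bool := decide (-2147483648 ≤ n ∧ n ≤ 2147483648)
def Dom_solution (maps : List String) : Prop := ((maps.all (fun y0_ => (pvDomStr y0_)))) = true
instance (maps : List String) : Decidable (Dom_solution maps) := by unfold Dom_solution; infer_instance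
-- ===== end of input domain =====

-- B replaces A's per-cell deque BFS with whole-frontier set saturation per component; equivalence of the
-- returned list is proved on Pre_ (grids on which A returns normally).

-- ===== PORT A =====
-- helpers shared by both ports: maps[i][j] as a char (in range under Pre_) and int(maps[i][j])
def gridCh (maps : List String) (i j : Int) : Char :=
  PySem.List.pyGetD (PySem.List.pyGetD maps i "").toList j 'X'

def cellVal (maps : List String) (i j : Int) : Int :=
  (PySem.Int.ofChars? [gridCh maps i j]).getD 0

-- the neighbour tuple ((I,J-1),(I,J+1),(I+1,J),(I-1,J))
def nbrsA (I J : Int) : List (Int × Int) := [(I, J - 1), (I, J + 1), (I + 1, J), (I - 1, J)]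

-- body of `for ni,nj in …`: state = (visited, cnt, queue)
def stepA (maps : List String) (n m : Int)
    (st : Finset (Int × Int) × Int × List (Int × Int)) (c : Int × Int) :
    Finset (Int × Int) × Int × List (Int × Int) :=
  if 0 ≤ c.1 ∧ c.1 < n ∧ 0 ≤ c.2 ∧ c.2 < m ∧ c ∉ st.1 ∧ gridCh maps c.1 c.2 ≠ 'X' then
    (insert c st.1, st.2.1 + cellVal maps c.1 c.2, st.2.2 ++ [c])
  else st

-- `while q:` — fuel only makes the loop total; inside Pre_ it never runs out (proved below)
def bfsA (maps : List String) (n m : Int) :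
    Nat → List (Int × Int) → Finset (Int × Int) → Int → Finset (Int × Int) × Int
  | 0, _, v, cnt => (v, cnt)
  | _ + 1, [], v, cnt => (v, cnt)
  | fuel + 1, c :: q, v, cnt =>
      let st := (nbrsA c.1 c.2).foldl (stepA maps n m) (v, cnt, q)
      bfsA maps n m fuel st.2.2 st.1 st.2.1

-- `for j in range(m):` — k columns left, j the current column
def colsA (maps : List String) (n m i : Int) :
    Nat → Int → Finset (Int × Int) → List Int → Finset (Int × Int) × List Int
  | 0, _, v, ans => (v, ans)
  | k + 1, j, v, ans =>
      if (i, j) ∉ v then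
        let v' := insert (i, j) v
        if gridCh maps i j ≠ 'X' then
          let r := bfsA maps n m (5 * n.toNat * m.toNat + 1) [(i, j)] v' (cellVal maps i j)
          colsA maps n m i k (j + 1) r.1 (ans ++ [r.2])
        else colsA maps n m i k (j + 1) v' ans
      else colsA maps n m i k (j + 1) v ans

-- `for i in range(n):`
def rowsA (maps : List String) (n m : Int) :
    Nat → Int → Finset (Int × Int) → List Int → Finset (Int × Int) × List Int
  | 0, _, v, ans => (v, ans)
  | r + 1, i, v, ans =>
      let s := colsA maps n m i m.toNat 0 v ans
      rowsA maps n m r (i + 1) s.1 s.2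

def solution (maps : List String) : List Int :=
  let n : Int := maps.length
  let m : Int := (PySem.List.pyGetD maps 0 "").toList.length
  let s := rowsA maps n m n.toNat 0 ∅ []
  let answer := PySem.List.sorted s.2 (fun x => x) false
  if answer = [] then [-1] else answer

-- ===== PORT B =====
-- {(x+dx, y+dy) for dx,dy in ((0,-1),(0,1),(1,0),(-1,0))}
def nbrsB (c : Int × Int) : Finset (Int × Int) :=
  {(c.1, c.2 - 1), (c.1, c.2 + 1), (c.1 + 1, c.2), (c.1 - 1, c.2)}

def expandB (s : Finset (Int × Int)) : Finset (Int × Int) := s.biUnion nbrsB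

-- `while frontier:` — saturate the component by whole-frontier expansion
def satB (R : Finset (Int × Int)) :
    Nat → Finset (Int × Int) → Finset (Int × Int) → Finset (Int × Int)
  | 0, comp, _ => comp
  | f + 1, comp, frontier =>
      if frontier = ∅ then comp
      else
        let fr' := (expandB frontier ∩ R) \ comp
        satB R f (comp ∪ fr') fr'

-- {(i,j) for i in range(n) for j in range(m) if maps[i][j] != 'X'}
def landB (maps : List String) (n m : Int) : Finset (Int × Int) :=
  (((PySem.List.pyRange 0 n 1).flatMap fun i =>
      (PySem.List.pyRange 0 m 1).map fun j => (i, j)).filter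
    (fun c => gridCh maps c.1 c.2 ≠ 'X')).toFinset

def colsB (maps : List String) (n m i : Int) :
    Nat → Int → Finset (Int × Int) → List Int → Finset (Int × Int) × List Int
  | 0, _, R, ans => (R, ans)
  | k + 1, j, R, ans =>
      if (i, j) ∈ R then
        let comp := satB R (n.toNat * m.toNat + 2) {(i, j)} {(i, j)}
        colsB maps n m i k (j + 1) (R \ comp)
          (ans ++ [comp.sum (fun c => cellVal maps c.1 c.2)])
      else colsB maps n m i k (j + 1) R ans

def rowsB (maps : List String) (n m : Int) :
    Nat → Int → Finset (Int × Int) → List Int → Finset (Int × Int) × List Int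
  | 0, _, R, ans => (R, ans)
  | r + 1, i, R, ans =>
      let s := colsB maps n m i m.toNat 0 R ans
      rowsB maps n m r (i + 1) s.1 s.2

def solution_alt (maps : List String) : List Int :=
  let n : Int := maps.length
  let m : Int := (PySem.List.pyGetD maps 0 "").toList.length
  let s := rowsB maps n m n.toNat 0 (landB maps n m) []
  if s.2 = [] then [-1] else PySem.List.sorted s.2 (fun x => x) false

-- ===== PRECONDITION & SPEC =====
-- Pre_: exactly the grids on which A returns normally: a nonempty list, every row at least as long as the
-- first, and every char in the first len(maps[0]) columns a decimal digit or 'X' (otherwise A raises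
-- IndexError or ValueError).
def Pre_solution (maps : List String) : Prop :=
  maps ≠ [] ∧
  ∀ s ∈ maps, (PySem.List.pyGetD maps 0 "").toList.length ≤ s.toList.length ∧
    ∀ j < (PySem.List.pyGetD maps 0 "").toList.length,
      (s.toList.getD j 'X').isDigit = true ∨ s.toList.getD j 'X' = 'X'
instance (maps : List String) : Decidable (Pre_solution maps) := by unfold Pre_solution; infer_instance

def pvWitness_solution : List String := ["X1X", "22X", "X4X"]

def Spec_solution (maps : List String) (out : List Int) : Prop := out = solution_alt maps
instance (maps : List String) (out : List Int) : Decidable (Spec_solution maps out) := by unfold Spec_solution; infer_instance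

-- ===== CLAIM (what is proved, stated in full; the proofs are below) =====
def Claim_equal_solution : Prop := ∀ (maps : List String), Dom_solution maps → Pre_solution maps → Spec_solution maps (solution maps)

-- ===== LEMMAS AND PROOFS =====

-- adjacency of grid cells (the four von-Neumann neighbours)
def adjP (b c : Int × Int) : Prop := c ∈ nbrsA b.1 b.2

-- reachability from a seed set S through cells of L
inductive Reach (L S : Finset (Int × Int)) : (Int × Int) → Prop
  | base (c : Int × Int) : c ∈ S → Reach L S c
  | step (b c : Int × Int) : Reach L S b → adjP b c → c ∈ L → Reach L S c

noncomputable def RF (L S : Finset (Int × Int)) : Finset (Int × Int) :=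
  @Finset.filter _ (fun c => Reach L S c) (fun _ => Classical.propDecidable _) L

def ClosedIn (L D : Finset (Int × Int)) : Prop :=
  ∀ c ∈ D, ∀ d, adjP c d → d ∈ L → d ∈ D

theorem adjP_symm {b c : Int × Int} (h : adjP b c) : adjP c b := by
  obtain ⟨b1, b2⟩ := b; obtain ⟨c1, c2⟩ := c
  simp only [adjP, nbrsA, List.mem_cons, Prod.mk.injEq,
    List.not_mem_nil, or_false] at h ⊢
  omega

theorem mem_RF {L S : Finset (Int × Int)} {c : Int × Int} :
    c ∈ RF L S ↔ c ∈ L ∧ Reach L S c := by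
  simp [RF, Finset.mem_filter]

theorem RF_subset {L S : Finset (Int × Int)} : RF L S ⊆ L := by
  intro c hc; exact (mem_RF.1 hc).1

theorem reach_compose {L S T : Finset (Int × Int)} {c : Int × Int}
    (hT : ∀ s ∈ T, Reach L S s) (h : Reach L T c) : Reach L S c := by
  induction h with
  | base c hc => exact hT c hc
  | step b c _ hadj hcL ih => exact Reach.step b c ih hadj hcL

theorem reach_in_L {L S : Finset (Int × Int)} {c : Int × Int}
    (hS : S ⊆ L) (h : Reach L S c) : c ∈ L := by
  induction h with
  | base c hc => exact hS hc
  | step b c _ _ hcL => exact hcL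

theorem reach_avoid {L D : Finset (Int × Int)} {x c : Int × Int}
    (hD : ClosedIn L D) (hxD : x ∉ D) (hxL : x ∈ L) (h : Reach L {x} c) : c ∉ D := by
  induction h with
  | base c hc => simp at hc; subst hc; exact hxD
  | step b c hb hadj hcL ih =>
      intro hcD
      exact ih (hD c hcD b (adjP_symm hadj) (reach_in_L (by simp [hxL]) hb))

theorem reach_relax {L R : Finset (Int × Int)} {x c : Int × Int}
    (hR : R ⊆ L) (h : Reach R {x} c) : Reach L {x} c := by
  induction h with
  | base c hc => exact Reach.base c hc
  | step b c _ hadj hcR ih => exact Reach.step b c ih hadj (hR hcR)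

theorem reach_restrict {L R : Finset (Int × Int)} {x c : Int × Int}
    (hR : R ⊆ L) (hD : ClosedIn L (L \ R)) (hx : x ∈ R) (h : Reach L {x} c) :
    Reach R {x} c := by
  induction h with
  | base c hc => exact Reach.base c hc
  | step b c hb hadj hcL ih =>
      refine Reach.step b c ih hadj ?_
      have hnot : c ∉ L \ R := reach_avoid hD (by simp [hx]) (hR hx)
        (Reach.step b c hb hadj hcL)
      simp only [Finset.mem_sdiff, hcL, true_and, not_not] at hnot
      exact hnot

theorem RF_eq_of_closed {L R : Finset (Int × Int)} {x : Int × Int}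
    (hR : R ⊆ L) (hD : ClosedIn L (L \ R)) (hx : x ∈ R) : RF R {x} = RF L {x} := by
  ext c
  simp only [mem_RF]
  constructor
  · rintro ⟨hcR, hreach⟩
    exact ⟨hR hcR, reach_relax hR hreach⟩
  · rintro ⟨hcL, hreach⟩
    have hcR : c ∈ R := by
      have := reach_avoid hD (by simp [hx]) (hR hx) hreach
      simp only [Finset.mem_sdiff, hcL, true_and, not_not] at this
      exact this
    exact ⟨hcR, reach_restrict hR hD hx hreach⟩

theorem not_reach_empty {L : Finset (Int × Int)} {c : Int × Int}
    (h : Reach L (∅ : Finset (Int × Int)) c) : False := by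
  induction h with
  | base c hc => exact absurd hc (Finset.notMem_empty c)
  | step _ _ _ _ _ ih => exact ih

theorem RF_empty {L : Finset (Int × Int)} : RF L (∅ : Finset (Int × Int)) = ∅ := by
  ext c
  simp only [mem_RF, Finset.notMem_empty, iff_false, not_and]
  exact fun _ h => not_reach_empty h

theorem RF_closed {L S : Finset (Int × Int)} : ClosedIn L (RF L S) := by
  intro c hc d hadj hdL
  exact mem_RF.2 ⟨hdL, Reach.step c d (mem_RF.1 hc).2 hadj hdL⟩


theorem mem_landB {maps : List String} {n m : Int} {c : Int × Int} :
    c ∈ landB maps n m ↔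
      0 ≤ c.1 ∧ c.1 < n ∧ 0 ≤ c.2 ∧ c.2 < m ∧ gridCh maps c.1 c.2 ≠ 'X' := by
  obtain ⟨i, j⟩ := c
  simp only [landB, List.mem_toFinset, List.mem_filter, List.mem_flatMap, List.mem_map,
    PySem.List.mem_pyRange_one, decide_not, Bool.not_eq_eq_eq_not, Bool.not_true,
    decide_eq_false_iff_not]
  constructor
  · rintro ⟨⟨a, ⟨ha1, ha2⟩, b, ⟨hb1, hb2⟩, hab⟩, hX⟩
    obtain ⟨rfl, rfl⟩ := Prod.mk.injEq .. ▸ hab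
    exact ⟨ha1, ha2, hb1, hb2, hX⟩
  · rintro ⟨h1, h2, h3, h4, hX⟩
    exact ⟨⟨i, ⟨h1, h2⟩, j, ⟨h3, h4⟩, rfl⟩, hX⟩

theorem card_landB_le {maps : List String} {n m : Int} :
    (landB maps n m).card ≤ n.toNat * m.toNat := by
  calc (landB maps n m).card
      ≤ (((PySem.List.pyRange 0 n 1).flatMap fun i =>
            (PySem.List.pyRange 0 m 1).map fun j => ((i : Int), j)).filter
          (fun c => gridCh maps c.1 c.2 ≠ 'X')).length := List.toFinset_card_le _
    _ ≤ ((PySem.List.pyRange 0 n 1).flatMap fun i =>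
            (PySem.List.pyRange 0 m 1).map fun j => ((i : Int), j)).length :=
        List.length_filter_le _ _
    _ ≤ n.toNat * m.toNat := by
        simp [List.length_flatMap, PySem.List.length_pyRange_one]

theorem nbrsA_nodup (I J : Int) : (nbrsA I J).Nodup := by
  simp only [nbrsA, List.nodup_cons, List.mem_cons, List.not_mem_nil, or_false,
    Prod.mk.injEq, List.nodup_nil, and_true, not_or, not_false_iff]
  and_intros <;> omega

def freshL (maps : List String) (n m : Int) (cands : List (Int × Int))
    (v : Finset (Int × Int)) : List (Int × Int) :=
  cands.filter (fun c => decide (c ∈ landB maps n m ∧ c ∉ v))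

theorem stepA_eq (maps : List String) (n m : Int)
    (st : Finset (Int × Int) × Int × List (Int × Int)) (c : Int × Int) :
    stepA maps n m st c = if c ∈ landB maps n m ∧ c ∉ st.1 then
      (insert c st.1, st.2.1 + cellVal maps c.1 c.2, st.2.2 ++ [c]) else st := by
  have hiff : (0 ≤ c.1 ∧ c.1 < n ∧ 0 ≤ c.2 ∧ c.2 < m ∧ c ∉ st.1 ∧
      gridCh maps c.1 c.2 ≠ 'X') ↔ (c ∈ landB maps n m ∧ c ∉ st.1) := by
    rw [mem_landB]; tauto
  rw [stepA, if_congr hiff rfl rfl]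

theorem foldl_stepA (maps : List String) (n m : Int) (cands : List (Int × Int)) :
    ∀ (v : Finset (Int × Int)) (cnt : Int) (q : List (Int × Int)), cands.Nodup →
    cands.foldl (stepA maps n m) (v, cnt, q) =
      (v ∪ (freshL maps n m cands v).toFinset,
       cnt + ((freshL maps n m cands v).map (fun c => cellVal maps c.1 c.2)).sum,
       q ++ freshL maps n m cands v) := by
  induction cands with
  | nil => intro v cnt q _; simp [freshL]
  | cons c cs ih =>
      intro v cnt q hnd
      rw [List.nodup_cons] at hnd
      rw [List.foldl_cons, stepA_eq]
      by_cases hc : c ∈ landB maps n m ∧ c ∉ v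
      · rw [if_pos hc]
        dsimp only
        have hfr : freshL maps n m cs (insert c v) = freshL maps n m cs v := by
          apply List.filter_congr
          intro x hx
          have hxc : x ≠ c := fun h => hnd.1 (h ▸ hx)
          simp [Finset.mem_insert, hxc]
        have hcons : freshL maps n m (c :: cs) v = c :: freshL maps n m cs v := by
          simp [freshL, hc.1, hc.2]
        rw [ih (insert c v) (cnt + cellVal maps c.1 c.2) (q ++ [c]) hnd.2, hfr, hcons]
        refine Prod.ext ?_ (Prod.ext ?_ ?_)
        · show insert c v ∪ _ = v ∪ _
          rw [List.toFinset_cons, Finset.insert_union, Finset.union_insert]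
        · show cnt + cellVal maps c.1 c.2 + _ = cnt + _
          simp [add_assoc]
        · show q ++ [c] ++ _ = q ++ _
          simp
      · rw [if_neg hc]
        have hcons : freshL maps n m (c :: cs) v = freshL maps n m cs v := by
          simp only [freshL, List.filter_cons, decide_eq_true_eq]
          rw [if_neg hc]
        rw [ih v cnt q hnd.2, hcons]

theorem freshL_sub_land (maps : List String) (n m : Int) (cands : List (Int × Int))
    (v : Finset (Int × Int)) : ∀ c ∈ freshL maps n m cands v,
      c ∈ landB maps n m ∧ c ∉ v := by
  intro c hc
  have := List.of_mem_filter hc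
  simpa using this

theorem freshL_nodup (maps : List String) (n m : Int) {cands : List (Int × Int)}
    (v : Finset (Int × Int)) (h : cands.Nodup) : (freshL maps n m cands v).Nodup :=
  h.filter _

theorem freshL_mem_iff (maps : List String) (n m : Int) {cands : List (Int × Int)}
    {v : Finset (Int × Int)} {c : Int × Int} :
    c ∈ freshL maps n m cands v ↔ c ∈ cands ∧ c ∈ landB maps n m ∧ c ∉ v := by
  simp [freshL, List.mem_filter]

theorem bfsA_spec (maps : List String) (n m : Int) :
    ∀ (fuel : Nat) (q : List (Int × Int)) (v : Finset (Int × Int)) (cnt : Int),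
    5 * ((landB maps n m) \ v).card + q.length ≤ fuel →
    q.Nodup →
    (∀ c ∈ q, c ∈ v) →
    (∀ c ∈ q, c ∈ landB maps n m) →
    (∀ c ∈ v, c ∈ landB maps n m → c ∉ q →
       ∀ d, adjP c d → d ∈ landB maps n m → d ∈ v) →
    bfsA maps n m fuel q v cnt =
      (v ∪ RF (landB maps n m) q.toFinset,
       cnt + ((RF (landB maps n m) q.toFinset) \ v).sum (fun c => cellVal maps c.1 c.2)) := by
  intro fuel
  induction fuel with
  | zero =>
      intro q v cnt hfuel _ _ _ _
      have hq : q = [] := List.length_eq_zero_iff.1 (by omega)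
      subst hq
      simp [bfsA, RF_empty]
  | succ fuel ih =>
      intro q v cnt hfuel hnd hqv hqL hcl
      match q with
      | [] => simp [bfsA, RF_empty]
      | c :: q' =>
        have hcv : c ∈ v := hqv c (List.mem_cons_self ..)
        have hcL : c ∈ landB maps n m := hqL c (List.mem_cons_self ..)
        rw [List.nodup_cons] at hnd
        rw [bfsA, foldl_stepA maps n m _ v cnt q' (nbrsA_nodup c.1 c.2)]
        set L := landB maps n m with hLdef
        set F := freshL maps n m (nbrsA c.1 c.2) v with hFdef
        set Fs := F.toFinset with hFsdef
        set val : Int × Int → Int := fun c => cellVal maps c.1 c.2 with hvaldef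
        have hFland : ∀ e ∈ Fs, e ∈ L ∧ e ∉ v := by
          intro e he; exact freshL_sub_land maps n m _ v e (List.mem_toFinset.1 he)
        have hFadj : ∀ e ∈ Fs, adjP c e := by
          intro e he
          exact (freshL_mem_iff maps n m).1 (List.mem_toFinset.1 he) |>.1
        have hQL : ∀ s ∈ (c :: q').toFinset, s ∈ L := by
          intro s hs; rw [List.mem_toFinset] at hs; exact hqL s hs
        have hQ'L : ∀ s ∈ (q' ++ F).toFinset, s ∈ L := by
          intro s hs
          rw [List.mem_toFinset, List.mem_append] at hs
          rcases hs with hs | hs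
          · exact hqL s (List.mem_cons_of_mem _ hs)
          · exact (hFland s (List.mem_toFinset.2 hs)).1
        -- (K1) the fresh neighbours are reachable from the old queue
        have hK1 : Fs ⊆ RF L (c :: q').toFinset := by
          intro e he
          refine mem_RF.2 ⟨(hFland e he).1, ?_⟩
          exact Reach.step c e (Reach.base c (by simp)) (hFadj e he) (hFland e he).1
        -- (K2) anything reachable from the new queue was reachable from the old
        have hK2 : RF L (q' ++ F).toFinset ⊆ RF L (c :: q').toFinset := by
          intro e he
          obtain ⟨heL, hr⟩ := mem_RF.1 he
          refine mem_RF.2 ⟨heL, reach_compose ?_ hr⟩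
          intro s hs
          rw [List.mem_toFinset, List.mem_append] at hs
          rcases hs with hs | hs
          · exact Reach.base s (by simp [hs])
          · exact (mem_RF.1 (hK1 (List.mem_toFinset.2 hs))).2
        -- (K3) the closure hypothesis for the new state
        have hK3 : ∀ e ∈ v ∪ Fs, e ∈ L → e ∉ q' ++ F →
            ∀ d, adjP e d → d ∈ L → d ∈ v ∪ Fs := by
          intro e he heL heq d hadj hdL
          rcases Finset.mem_union.1 he with hev | heF
          · by_cases hec : e = c
            · subst hec
              by_cases hdv : d ∈ v
              · exact Finset.mem_union_left _ hdv
              · refine Finset.mem_union_right _ (List.mem_toFinset.2 ?_)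
                exact (freshL_mem_iff maps n m).2 ⟨hadj, hdL, hdv⟩
            · have : e ∉ c :: q' := by
                intro hmem
                rcases List.mem_cons.1 hmem with h | h
                · exact hec h
                · exact heq (List.mem_append_left _ h)
              exact Finset.mem_union_left _ (hcl e hev heL this d hadj hdL)
          · exact absurd (List.mem_append_right _ (List.mem_toFinset.1 heF)) heq
        -- (K4) escape: everything reachable from the old queue is settled or reachable anew
        have hK4 : ∀ e, Reach L (c :: q').toFinset e →
            e ∈ v ∪ Fs ∨ Reach L (q' ++ F).toFinset e := by
          intro e he
          induction he with
          | base e he0 =>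
              rw [List.mem_toFinset, List.mem_cons] at he0
              rcases he0 with rfl | he0
              · exact Or.inl (Finset.mem_union_left _ hcv)
              · exact Or.inr (Reach.base e (by simp [he0]))
          | step b e hb hadj heL' ih' =>
              rcases ih' with hbv | hbr
              · have hbL : b ∈ L := reach_in_L hQL hb
                by_cases hbq : b ∈ q' ++ F
                · exact Or.inr (Reach.step b e (Reach.base b (List.mem_toFinset.2 hbq))
                    hadj heL')
                · exact Or.inl (hK3 b hbv hbL hbq e hadj heL')
              · exact Or.inr (Reach.step b e hbr hadj heL')
        have hFv : ∀ e ∈ Fs, e ∉ v := fun e he => (hFland e he).2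
        -- (a) splitting the newly counted region
        have ha : RF L (c :: q').toFinset \ v =
            Fs ∪ (RF L (q' ++ F).toFinset \ (v ∪ Fs)) := by
          ext e
          simp only [Finset.mem_sdiff, Finset.mem_union]
          constructor
          · rintro ⟨heRF, hev⟩
            by_cases heF : e ∈ Fs
            · exact Or.inl heF
            · obtain ⟨heL, hr⟩ := mem_RF.1 heRF
              rcases hK4 e hr with h | h
              · rcases Finset.mem_union.1 h with h | h
                · exact absurd h hev
                · exact absurd h heF
              · exact Or.inr ⟨mem_RF.2 ⟨heL, h⟩, by tauto⟩
          · rintro (heF | ⟨heRF, hev⟩)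
            · exact ⟨hK1 heF, hFv e heF⟩
            · exact ⟨hK2 heRF, fun h => hev (Or.inl h)⟩
        have hdisj : Disjoint Fs (RF L (q' ++ F).toFinset \ (v ∪ Fs)) := by
          rw [Finset.disjoint_left]
          intro e heF he
          exact (Finset.mem_sdiff.1 he).2 (Finset.mem_union_right _ heF)
        -- (c) the final visited set is unchanged
        have hc' : v ∪ RF L (c :: q').toFinset = (v ∪ Fs) ∪ RF L (q' ++ F).toFinset := by
          apply Finset.Subset.antisymm
          · intro e he
            rcases Finset.mem_union.1 he with h | h
            · exact Finset.mem_union_left _ (Finset.mem_union_left _ h)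
            · obtain ⟨heL, hr⟩ := mem_RF.1 h
              rcases hK4 e hr with h' | h'
              · exact Finset.mem_union_left _ h'
              · exact Finset.mem_union_right _ (mem_RF.2 ⟨heL, h'⟩)
          · intro e he
            rcases Finset.mem_union.1 he with h | h
            · rcases Finset.mem_union.1 h with h' | h'
              · exact Finset.mem_union_left _ h'
              · exact Finset.mem_union_right _ (hK1 h')
            · exact Finset.mem_union_right _ (hK2 h)
        -- (e) the list sum of fresh values is the finset sum
        have hFnd : F.Nodup := freshL_nodup maps n m v (nbrsA_nodup c.1 c.2)
        have he' : Fs.sum val = (F.map val).sum := by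
          rw [hFsdef, List.sum_toFinset val hFnd]
        -- the inductive step
        have hsub : Fs ⊆ L \ v := by
          intro e he
          exact Finset.mem_sdiff.2 ⟨(hFland e he).1, (hFland e he).2⟩
        have hcard : (L \ (v ∪ Fs)).card = (L \ v).card - Fs.card := by
          rw [show L \ (v ∪ Fs) = (L \ v) \ Fs by
            ext e; simp only [Finset.mem_sdiff, Finset.mem_union]; tauto]
          exact Finset.card_sdiff_of_subset hsub
        have hFcard : Fs.card = F.length := List.toFinset_card_of_nodup hFnd
        have hFle : Fs.card ≤ (L \ v).card := Finset.card_le_card hsub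
        have hfuel' : 5 * ((L \ (v ∪ Fs)).card) + (q' ++ F).length ≤ fuel := by
          rw [hcard, List.length_append]
          simp only [List.length_cons] at hfuel
          omega
        have hnd' : (q' ++ F).Nodup := by
          rw [List.nodup_append]
          refine ⟨hnd.2, hFnd, ?_⟩
          intro e he1 b hb2 hEq
          exact hFv b (List.mem_toFinset.2 hb2)
            (hqv b (List.mem_cons_of_mem _ (hEq ▸ he1)))
        have hqv' : ∀ e ∈ q' ++ F, e ∈ v ∪ Fs := by
          intro e he
          rcases List.mem_append.1 he with h | h
          · exact Finset.mem_union_left _ (hqv e (List.mem_cons_of_mem _ h))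
          · exact Finset.mem_union_right _ (List.mem_toFinset.2 h)
        have hqL' : ∀ e ∈ q' ++ F, e ∈ L := by
          intro e he; exact hQ'L e (List.mem_toFinset.2 he)
        rw [ih (q' ++ F) (v ∪ Fs) (cnt + (F.map val).sum) hfuel' hnd' hqv' hqL' hK3]
        refine Prod.ext ?_ ?_
        · exact hc'.symm
        · show cnt + (F.map val).sum + _ = cnt + _
          rw [ha, Finset.sum_union hdisj, he']
          ring

set_option maxHeartbeats 1000000 in
theorem bfsA_run (maps : List String) (n m : Int) (v : Finset (Int × Int))
    (x : Int × Int) (hxL : x ∈ landB maps n m) (hxv : x ∉ v)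
    (hclv : ∀ c ∈ v, c ∈ landB maps n m →
      ∀ d, adjP c d → d ∈ landB maps n m → d ∈ v) :
    bfsA maps n m (5 * n.toNat * m.toNat + 1) [x] (insert x v) (cellVal maps x.1 x.2) =
      (v ∪ RF (landB maps n m) {x},
       (RF (landB maps n m) {x}).sum (fun c => cellVal maps c.1 c.2)) := by
  have hcard : (landB maps n m \ insert x v).card ≤ n.toNat * m.toNat :=
    le_trans (Finset.card_le_card (Finset.sdiff_subset)) card_landB_le
  have hfuel : 5 * (landB maps n m \ insert x v).card + [x].length ≤ 5 * n.toNat * m.toNat + 1 := by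
    rw [mul_assoc]
    simpa using Nat.add_le_add_right (Nat.mul_le_mul_left 5 hcard) 1
  have h4 : ∀ c ∈ insert x v, c ∈ landB maps n m → c ∉ [x] →
      ∀ d, adjP c d → d ∈ landB maps n m → d ∈ insert x v := by
    intro c hc hcL hcq d hadj hdL
    have hcx : c ≠ x := by simpa using hcq
    rcases Finset.mem_insert.1 hc with rfl | hcv
    · exact absurd rfl hcx
    · exact Finset.mem_insert_of_mem (hclv c hcv hcL d hadj hdL)
  have hmain := bfsA_spec maps n m (5 * n.toNat * m.toNat + 1) [x] (insert x v)
    (cellVal maps x.1 x.2) hfuel (by simp) (by simp) (by simpa using hxL) h4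
  rw [hmain]
  have htf : ([x] : List (Int × Int)).toFinset = {x} := by simp
  rw [htf]
  have hxRF : x ∈ RF (landB maps n m) {x} := mem_RF.2 ⟨hxL, Reach.base x (by simp)⟩
  have hRFv : ∀ e ∈ RF (landB maps n m) {x}, e ∉ v := by
    intro e he
    have hcl' : ClosedIn (landB maps n m) (v ∩ landB maps n m) := by
      intro c hc d hadj hdL
      exact Finset.mem_inter.2
        ⟨hclv c (Finset.mem_inter.1 hc).1 (Finset.mem_inter.1 hc).2 d hadj hdL, hdL⟩
    have := reach_avoid hcl' (by simp [hxv]) hxL (mem_RF.1 he).2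
    intro hev
    exact this (Finset.mem_inter.2 ⟨hev, (mem_RF.1 he).1⟩)
  have hsd : RF (landB maps n m) {x} \ insert x v = (RF (landB maps n m) {x}).erase x := by
    ext e
    simp only [Finset.mem_sdiff, Finset.mem_insert, Finset.mem_erase, not_or]
    constructor
    · rintro ⟨h1, h2, _⟩; exact ⟨h2, h1⟩
    · rintro ⟨h1, h2⟩; exact ⟨h2, h1, hRFv e h2⟩
  rw [hsd, Finset.insert_union, Finset.insert_eq_self.2 (Finset.mem_union_right _ hxRF),
    Finset.add_sum_erase _ (fun c => cellVal maps c.1 c.2) hxRF]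

theorem mem_expandB {s : Finset (Int × Int)} {d : Int × Int} :
    d ∈ expandB s ↔ ∃ c ∈ s, adjP c d := by
  simp only [expandB, Finset.mem_biUnion, nbrsB, adjP, nbrsA, Finset.mem_insert,
    Finset.mem_singleton, List.mem_cons, List.not_mem_nil, or_false]

theorem closed_eq_RF {R comp : Finset (Int × Int)} {x : Int × Int}
    (hx : x ∈ comp) (hsub : comp ⊆ RF R {x})
    (hcl : ∀ c ∈ comp, ∀ d, adjP c d → d ∈ R → d ∈ comp) : comp = RF R {x} := by
  refine Finset.Subset.antisymm hsub ?_
  intro e he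
  have hr : Reach R {x} e := (mem_RF.1 he).2
  clear he
  induction hr with
  | base e he0 => rwa [Finset.mem_singleton.1 he0]
  | step b e _ hadj heR ih => exact hcl b ih e hadj heR

theorem satB_empty_frontier (R : Finset (Int × Int)) (f : Nat)
    (comp : Finset (Int × Int)) : satB R f comp ∅ = comp := by
  cases f <;> simp [satB]

theorem satB_spec (R : Finset (Int × Int)) (x : Int × Int) :
    ∀ (f : Nat) (comp frontier : Finset (Int × Int)),
    R.card + 2 ≤ f + comp.card →
    frontier ⊆ comp →
    comp ⊆ RF R {x} →
    x ∈ comp →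
    (∀ c ∈ comp, c ∉ frontier → ∀ d, adjP c d → d ∈ R → d ∈ comp) →
    satB R f comp frontier = RF R {x} := by
  intro f
  induction f with
  | zero =>
      intro comp frontier hfuel _ hsub _ _
      have : comp.card ≤ R.card :=
        Finset.card_le_card (fun e he => RF_subset (hsub he))
      omega
  | succ f ih =>
      intro comp frontier hfuel hfc hsub hx hcl
      by_cases hfr : frontier = ∅
      · subst hfr
        rw [satB_empty_frontier]
        exact closed_eq_RF hx hsub (fun c hc => hcl c hc (Finset.notMem_empty c))
      · rw [satB, if_neg hfr]
        show satB R f (comp ∪ ((expandB frontier ∩ R) \ comp))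
          ((expandB frontier ∩ R) \ comp) = RF R {x}
        by_cases hfr' : (expandB frontier ∩ R) \ comp = ∅
        · rw [hfr', Finset.union_empty, satB_empty_frontier]

          refine closed_eq_RF hx hsub ?_
          intro c hc d hadj hdR
          by_cases hdc : d ∈ comp
          · exact hdc
          · by_cases hcf : c ∈ frontier
            · exfalso
              have : d ∈ (expandB frontier ∩ R) \ comp :=
                Finset.mem_sdiff.2
                  ⟨Finset.mem_inter.2 ⟨mem_expandB.2 ⟨c, hcf, hadj⟩, hdR⟩, hdc⟩
              rw [hfr'] at this
              exact Finset.notMem_empty d this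
            · exact absurd (hcl c hc hcf d hadj hdR) hdc
        · set fr' := (expandB frontier ∩ R) \ comp with hfr'def
          have hdisj : Disjoint comp fr' := by
            rw [Finset.disjoint_right]
            intro e he
            exact (Finset.mem_sdiff.1 he).2
          have hpos : 0 < fr'.card :=
            Finset.card_pos.2 (Finset.nonempty_iff_ne_empty.2 hfr')
          refine ih (comp ∪ fr') fr' ?_ Finset.subset_union_right ?_
            (Finset.mem_union_left _ hx) ?_
          · rw [Finset.card_union_of_disjoint hdisj]
            omega
          · intro e he
            rcases Finset.mem_union.1 he with h | h
            · exact hsub h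
            · obtain ⟨hin, hec⟩ := Finset.mem_sdiff.1 h
              obtain ⟨hex, heR⟩ := Finset.mem_inter.1 hin
              obtain ⟨c, hcf, hadj⟩ := mem_expandB.1 hex
              exact mem_RF.2 ⟨heR,
                Reach.step c e (mem_RF.1 (hsub (hfc hcf))).2 hadj heR⟩
          · intro c hc hcf d hadj hdR
            rcases Finset.mem_union.1 hc with hcc | hcc
            · by_cases hcfr : c ∈ frontier
              · by_cases hdc : d ∈ comp
                · exact Finset.mem_union_left _ hdc
                · refine Finset.mem_union_right _ ?_
                  exact Finset.mem_sdiff.2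
                    ⟨Finset.mem_inter.2 ⟨mem_expandB.2 ⟨c, hcfr, hadj⟩, hdR⟩, hdc⟩
              · exact Finset.mem_union_left _ (hcl c hcc hcfr d hadj hdR)
            · exact absurd hcc hcf

theorem satB_run (maps : List String) (n m : Int) (R : Finset (Int × Int))
    (x : Int × Int) (hRL : R ⊆ landB maps n m)
    (hcls : ClosedIn (landB maps n m) (landB maps n m \ R)) (hxR : x ∈ R) :
    satB R (n.toNat * m.toNat + 2) {x} {x} = RF (landB maps n m) {x} := by
  rw [← RF_eq_of_closed hRL hcls hxR]
  refine satB_spec R x _ {x} {x} ?_ (by simp) ?_ (by simp) ?_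
  · have h1 : R.card ≤ (landB maps n m).card := Finset.card_le_card hRL
    have h2 := card_landB_le (maps := maps) (n := n) (m := m)
    simp only [Finset.card_singleton]
    omega
  · intro e he
    rw [Finset.mem_singleton.1 he]
    exact mem_RF.2 ⟨hxR, Reach.base x (by simp)⟩
  · intro c hc hcf
    exact absurd hc hcf

-- X cells of the grid scanned strictly before position (i, j), in row-major order
def XBset (maps : List String) (n m i j : Int) : Finset (Int × Int) :=
  (((PySem.List.pyRange 0 n 1).flatMap fun a =>
      (PySem.List.pyRange 0 m 1).map fun b => ((a : Int), b)).filter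
    (fun c => decide (gridCh maps c.1 c.2 = 'X' ∧ (c.1 < i ∨ (c.1 = i ∧ c.2 < j))))).toFinset

theorem mem_XBset {maps : List String} {n m i j : Int} {c : Int × Int} :
    c ∈ XBset maps n m i j ↔
      0 ≤ c.1 ∧ c.1 < n ∧ 0 ≤ c.2 ∧ c.2 < m ∧ gridCh maps c.1 c.2 = 'X' ∧
      (c.1 < i ∨ (c.1 = i ∧ c.2 < j)) := by
  obtain ⟨a, b⟩ := c
  simp only [XBset, List.mem_toFinset, List.mem_filter, List.mem_flatMap, List.mem_map,
    PySem.List.mem_pyRange_one, decide_eq_true_eq]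
  constructor
  · rintro ⟨⟨a', ⟨ha1, ha2⟩, b', ⟨hb1, hb2⟩, hab⟩, hX, hlex⟩
    obtain ⟨rfl, rfl⟩ := Prod.mk.injEq .. ▸ hab
    exact ⟨ha1, ha2, hb1, hb2, hX, hlex⟩
  · rintro ⟨h1, h2, h3, h4, hX, hlex⟩
    exact ⟨⟨a, ⟨h1, h2⟩, b, ⟨h3, h4⟩, rfl⟩, hX, hlex⟩

theorem XBset_zero (maps : List String) (n m : Int) :
    XBset maps n m 0 0 = ∅ := by
  ext c
  simp only [mem_XBset, Finset.notMem_empty, iff_false]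
  omega

theorem XBset_rollover (maps : List String) (n m i : Int) :
    XBset maps n m i m = XBset maps n m (i + 1) 0 := by
  ext c
  simp only [mem_XBset]
  constructor
  · rintro ⟨h1, h2, h3, h4, hX, hlex⟩
    exact ⟨h1, h2, h3, h4, hX, by omega⟩
  · rintro ⟨h1, h2, h3, h4, hX, hlex⟩
    exact ⟨h1, h2, h3, h4, hX, by omega⟩

theorem XBset_stepX (maps : List String) {n m i j : Int}
    (hX : gridCh maps i j = 'X') (hi0 : 0 ≤ i) (hin : i < n) (hj0 : 0 ≤ j)
    (hjm : j < m) :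
    XBset maps n m i (j + 1) = insert (i, j) (XBset maps n m i j) := by
  ext c
  obtain ⟨a, b⟩ := c
  simp only [mem_XBset, Finset.mem_insert, Prod.mk.injEq]
  constructor
  · rintro ⟨h1, h2, h3, h4, hch, hlex⟩
    by_cases hceq : a = i ∧ b = j
    · exact Or.inl hceq
    · exact Or.inr ⟨h1, h2, h3, h4, hch, by omega⟩
  · rintro (⟨rfl, rfl⟩ | ⟨h1, h2, h3, h4, hch, hlex⟩)
    · exact ⟨hi0, hin, hj0, hjm, hX, by omega⟩
    · exact ⟨h1, h2, h3, h4, hch, by omega⟩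

theorem XBset_stepL (maps : List String) {n m i j : Int}
    (hch : gridCh maps i j ≠ 'X') :
    XBset maps n m i (j + 1) = XBset maps n m i j := by
  ext c
  obtain ⟨a, b⟩ := c
  simp only [mem_XBset]
  constructor
  · rintro ⟨h1, h2, h3, h4, hch', hlex⟩
    refine ⟨h1, h2, h3, h4, hch', ?_⟩
    by_cases hceq : a = i ∧ b = j
    · obtain ⟨rfl, rfl⟩ := hceq
      exact absurd hch' hch
    · omega
  · rintro ⟨h1, h2, h3, h4, hch', hlex⟩
    exact ⟨h1, h2, h3, h4, hch', by omega⟩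

-- the outer-loop invariant tying A's visited matrix to B's remaining set
def InvP (maps : List String) (n m i j : Int) (v R : Finset (Int × Int)) : Prop :=
  R ⊆ landB maps n m ∧
  ClosedIn (landB maps n m) (landB maps n m \ R) ∧
  v = (landB maps n m \ R) ∪ XBset maps n m i j

set_option maxHeartbeats 2000000 in
theorem cols_eq (maps : List String) (n m i : Int) (hi0 : 0 ≤ i) (hin : i < n) :
    ∀ (k : Nat) (j : Int) (v R : Finset (Int × Int)) (ans : List Int),
    0 ≤ j → j + k = m →
    InvP maps n m i j v R →
    InvP maps n m i m (colsA maps n m i k j v ans).1 (colsB maps n m i k j R ans).1 ∧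
    (colsA maps n m i k j v ans).2 = (colsB maps n m i k j R ans).2 := by
  intro k
  induction k with
  | zero =>
      intro j v R ans hj0 hjk hInv
      have : j = m := by omega
      subst this
      exact ⟨hInv, rfl⟩
  | succ k ih =>
      intro j v R ans hj0 hjk hInv
      obtain ⟨hRL, hcls, hveq⟩ := hInv
      have hjm : j < m := by omega
      have hXBnotL : ∀ c ∈ XBset maps n m i j, c ∉ landB maps n m := by
        intro c hc hcL
        exact (mem_landB.1 hcL).2.2.2.2 (mem_XBset.1 hc).2.2.2.2.1
      by_cases hX : gridCh maps i j = 'X'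
      · -- an X cell: A marks it visited, B ignores it
        have hnotv : (i, j) ∉ v := by
          rw [hveq]
          intro hmem
          rcases Finset.mem_union.1 hmem with h | h
          · exact (mem_landB.1 ((Finset.mem_sdiff.1 h).1)).2.2.2.2 hX
          · have := (mem_XBset.1 h).2.2.2.2.2
            simp only at this
            omega
        have hnotR : (i, j) ∉ R := by
          intro h
          exact (mem_landB.1 (hRL h)).2.2.2.2 hX
        have hnotX : ¬ (gridCh maps i j ≠ 'X') := by simpa using hX
        simp only [colsA, colsB]
        rw [if_pos hnotv, if_neg hnotR, if_neg hnotX]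
        refine ih (j + 1) (insert (i, j) v) R ans (by omega) (by omega) ?_
        refine ⟨hRL, hcls, ?_⟩
        rw [hveq, XBset_stepX maps hX hi0 hin hj0 hjm, Finset.union_insert]
      · -- a land cell
        have hijL : (i, j) ∈ landB maps n m :=
          mem_landB.2 ⟨hi0, hin, hj0, hjm, hX⟩
        by_cases hR : (i, j) ∈ R
        · -- unvisited land: both sides flood the component
          have hnotv : (i, j) ∉ v := by
            rw [hveq]
            intro hmem
            rcases Finset.mem_union.1 hmem with h | h
            · exact (Finset.mem_sdiff.1 h).2 hR
            · exact (hXBnotL _ h) hijL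
          simp only [colsA, colsB]
          rw [if_pos hnotv, if_pos hR, if_pos hX]
          have hclv : ∀ c ∈ v, c ∈ landB maps n m →
              ∀ d, adjP c d → d ∈ landB maps n m → d ∈ v := by
            intro c hc hcL d hadj hdL
            have hcLR : c ∈ landB maps n m \ R := by
              rw [hveq] at hc
              rcases Finset.mem_union.1 hc with h | h
              · exact h
              · exact absurd hcL (hXBnotL _ h)
            rw [hveq]
            exact Finset.mem_union_left _ (hcls c hcLR d hadj hdL)
          have hbfs := bfsA_run maps n m v (i, j) hijL hnotv hclv
          have hsat := satB_run maps n m R (i, j) hRL hcls hR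
          rw [hbfs, hsat]
          set CC := RF (landB maps n m) {(i, j)} with hCC
          have hCCL : CC ⊆ landB maps n m := RF_subset
          have hCCR : CC ⊆ R := by
            intro e he
            obtain ⟨heL, hr⟩ := mem_RF.1 he
            have := reach_avoid hcls (by simp [Finset.mem_sdiff, hR]) hijL hr
            simp only [Finset.mem_sdiff, heL, true_and, not_not] at this
            exact this
          have hLsplit : landB maps n m \ (R \ CC) =
              (landB maps n m \ R) ∪ CC := by
            ext e
            simp only [Finset.mem_sdiff, Finset.mem_union]
            constructor
            · rintro ⟨heL, hnot⟩
              by_cases heC : e ∈ CC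
              · exact Or.inr heC
              · exact Or.inl ⟨heL, fun heR => hnot ⟨heR, heC⟩⟩
            · rintro (⟨heL, heR⟩ | heC)
              · exact ⟨heL, fun h => heR h.1⟩
              · exact ⟨hCCL heC, fun h => h.2 heC⟩
          refine ih (j + 1) _ _ _ (by omega) (by omega) ?_
          refine ⟨fun e he => hRL (Finset.mem_sdiff.1 he).1, ?_, ?_⟩
          · rw [hLsplit]
            intro c hc d hadj hdL
            rcases Finset.mem_union.1 hc with h | h
            · exact Finset.mem_union_left _ (hcls c h d hadj hdL)
            · exact Finset.mem_union_right _ (RF_closed c h d hadj hdL)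
          · rw [hLsplit, XBset_stepL maps hX, hveq]
            ext e
            simp only [Finset.mem_union]
            tauto
        · -- visited land: both sides skip
          have hv : (i, j) ∈ v := by
            rw [hveq]
            exact Finset.mem_union_left _ (Finset.mem_sdiff.2 ⟨hijL, hR⟩)
          simp only [colsA, colsB]
          rw [if_neg (by simpa using hv), if_neg hR]
          refine ih (j + 1) v R ans (by omega) (by omega) ?_
          exact ⟨hRL, hcls, by rw [hveq, XBset_stepL maps hX]⟩

theorem rows_eq (maps : List String) (n m : Int) (hm : (m.toNat : Int) = m) :
    ∀ (r : Nat) (i : Int) (v R : Finset (Int × Int)) (ans : List Int),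
    0 ≤ i → i + r = n →
    InvP maps n m i 0 v R →
    (rowsA maps n m r i v ans).2 = (rowsB maps n m r i R ans).2 := by
  intro r
  induction r with
  | zero => intro i v R ans _ _ _; simp [rowsA, rowsB]
  | succ r ih =>
      intro i v R ans hi0 hir hInv
      have hin : i < n := by omega
      obtain ⟨hInv', hans⟩ := cols_eq maps n m i hi0 hin m.toNat 0 v R ans le_rfl
        (by omega) hInv
      simp only [rowsA, rowsB]
      rw [hans]
      refine ih (i + 1) _ _ _ (by omega) (by omega) ?_
      obtain ⟨h1, h2, h3⟩ := hInv'
      exact ⟨h1, h2, by rw [h3, XBset_rollover]⟩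

-- ===== VERDICT (by name: the statement is the Claim_ definition above) =====
theorem sorted_nil_iff (xs : List Int) :
    PySem.List.sorted xs (fun x => x) false = [] ↔ xs = [] := by
  constructor
  · intro h0
    have hp := PySem.List.sorted_perm xs (fun x => x) false
    rw [h0] at hp
    exact (List.perm_nil.1 hp.symm)
  · intro h0
    subst h0
    exact List.perm_nil.1 (PySem.List.sorted_perm [] (fun x => x) false)

theorem solution_spec : Claim_equal_solution := by
  unfold Claim_equal_solution
  intro maps _ _
  unfold Spec_solution
  simp only [solution, solution_alt]
  set n : Int := (maps.length : Int) with hn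
  set m : Int := ((PySem.List.pyGetD maps 0 "").toList.length : Int) with hmdef
  have hInv0 : InvP maps n m 0 0 ∅ (landB maps n m) := by
    refine ⟨subset_rfl, ?_, ?_⟩
    · intro c hc
      rw [Finset.sdiff_self] at hc
      exact absurd hc (Finset.notMem_empty c)
    · rw [Finset.sdiff_self, Finset.empty_union, XBset_zero]
  have hm : (m.toNat : Int) = m := by
    rw [hmdef]; simp
  have hrows := rows_eq maps n m hm n.toNat 0 ∅ (landB maps n m) [] le_rfl
    (by rw [hn]; simp) hInv0
  rw [hrows]
  by_cases h0 : (rowsB maps n m n.toNat 0 (landB maps n m) []).2 = []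
  · rw [if_pos ((sorted_nil_iff _).2 h0), if_pos h0]
  · rw [if_neg (fun h => h0 ((sorted_nil_iff _).1 h)), if_neg h0]
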